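-- pv_equiv track=rewrite | github.com/DanielHara/leetcode-solutions | solutions/2135.py | isObtainable
-- ===== SOURCE A (Python) =====
-- def isObtainable(targetWord: str, startWords_set):
--     frequency_dict = {}
--     for char in targetWord:
--         frequency_dict[char] = frequency_dict.get(char, 0) + 1
--
--     chars = list(frequency_dict.items())
--     chars.sort(key=lambda entry: entry[0])
--
--     candidates = list(filter(lambda el: el[1] == 1, chars))
--
--     for candidate in candidates:
--         letter = candidate[0]
--
--         tokens = []
--         for [key, value] in chars:
--             if key != letter:
--                 tokens.append(key + str(value))
--
--         if '_'.join(tokens) in startWords_set: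
--             return True
--
--     return False
-- ===== SOURCE B (Python) =====
-- def isObtainable(targetWord: str, startWords_set):
--     # sort the characters and run-length encode them: (char, count) in ascending order
--     def runs(chars):
--         if not chars:
--             return []
--         head = chars[0]
--         i = 1
--         while i < len(chars) and chars[i] == head:
--             i += 1
--         return [(head, i)] + runs(chars[i:])
--
--     rs = runs(sorted(targetWord))
--     cands = {'_'.join(c + str(n) for c, n in rs if c != x)
--              for x, m in rs if m == 1}
--     return any(w in cands for w in startWords_set)
-- ===== Notes on version B (the rewrite author's own statement) =====
-- stated objective: alternative
-- what changed: B replaces A's hash-map counting and per-candidate token rebuild by sort-the-characters + run-length encoding (no dict at all), builds the set of candidate signatures once, and inverts the membership scan: it iterates startWords_set testing each word against that precomputed set.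
import Mathlib
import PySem

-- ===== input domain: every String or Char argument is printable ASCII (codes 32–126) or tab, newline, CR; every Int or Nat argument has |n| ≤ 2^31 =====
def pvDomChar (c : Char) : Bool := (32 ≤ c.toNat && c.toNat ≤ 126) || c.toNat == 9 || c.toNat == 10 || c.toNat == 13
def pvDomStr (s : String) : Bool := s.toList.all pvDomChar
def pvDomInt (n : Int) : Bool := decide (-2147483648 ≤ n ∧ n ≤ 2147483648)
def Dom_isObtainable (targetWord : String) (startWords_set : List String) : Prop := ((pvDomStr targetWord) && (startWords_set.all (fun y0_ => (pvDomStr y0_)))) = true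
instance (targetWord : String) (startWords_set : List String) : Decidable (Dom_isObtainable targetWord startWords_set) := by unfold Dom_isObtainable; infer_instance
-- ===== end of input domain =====

-- B replaces A's dict counting + per-candidate token rebuild with sort-then-run-length-encode
-- and an inverted membership scan over a precomputed candidate-signature set; objective: alternative.

-- ===== PORT A =====
-- key + str(value)
def pvTokA (kv : Char × Int) : String := String.ofList (kv.1 :: (PySem.Int.toStr kv.2).toList)

-- the 'for candidate in candidates: … return True' loop of A (early return = recursion)
def pvGoA (chars : List (Char × Int)) (sws : List String) : List (Char × Int) → Bool
  | [] => false
  | cand :: rest =>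
    let letter := cand.1
    let tokens := chars.foldl (fun acc kv => if kv.1 ≠ letter then acc ++ [pvTokA kv] else acc) []
    if sws.contains (PySem.Str.join "_" tokens) then true
    else pvGoA chars sws rest

def isObtainable (targetWord : String) (startWords_set : List String) : Bool :=
  let freq : PySem.Dict Char Int :=
    targetWord.toList.foldl (fun d c => d.insert c (d.getD c 0 + 1)) PySem.Dict.empty
  let chars := PySem.List.sorted freq.items (fun e => e.1) false
  let candidates := chars.filter (fun el => el.2 == 1)
  pvGoA chars startWords_set candidates

-- ===== PORT B =====
-- runs(chars): run-length encoding of an (already sorted) char list; the inner while loop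
-- counting equal leading chars and the slice chars[i:] are takeWhile/dropWhile (exact here)
def pvRuns : List Char → List (Char × Int)
  | [] => []
  | c :: rest =>
    (c, 1 + (rest.takeWhile (· == c)).length) :: pvRuns (rest.dropWhile (· == c))
termination_by l => l.length
decreasing_by
  simp only [List.length_cons]
  exact Nat.lt_succ_of_le (List.length_dropWhile_le _ _)

def isObtainable_alt (targetWord : String) (startWords_set : List String) : Bool :=
  let rs := pvRuns (PySem.List.sorted targetWord.toList (fun x => x) false)
  let cands : PySem.Set String := PySem.Set.ofList
    ((rs.filter (fun xm => xm.2 == 1)).map (fun xm =>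
      PySem.Str.join "_" ((rs.filter (fun cn => cn.1 ≠ xm.1)).map (fun cn => String.ofList (cn.1 :: (PySem.Int.toStr cn.2).toList)))))
  startWords_set.any (fun w => PySem.Set.contains cands w)

-- ===== PRECONDITION & SPEC =====
def Spec_isObtainable (targetWord : String) (startWords_set : List String) (out : Bool) : Prop := out = isObtainable_alt targetWord startWords_set
instance (targetWord : String) (startWords_set : List String) (out : Bool) : Decidable (Spec_isObtainable targetWord startWords_set out) := by unfold Spec_isObtainable; infer_instance

-- ===== CLAIM (what is proved, stated in full; the proofs are below) =====
def Claim_equal_isObtainable : Prop := ∀ (targetWord : String) (startWords_set : List String), Dom_isObtainable targetWord startWords_set → Spec_isObtainable targetWord startWords_set (isObtainable targetWord startWords_set)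

-- ===== LEMMAS AND PROOFS =====

theorem pvGoA_eq_any (chars : List (Char × Int)) (sws : List String) (l : List (Char × Int)) :
    pvGoA chars sws l = l.any (fun c =>
      sws.contains (PySem.Str.join "_"
        ((chars.filter (fun kv => decide (kv.1 ≠ c.1))).map pvTokA))) := by
  induction l with
  | nil => rfl
  | cons cand rest ih =>
    simp only [pvGoA, PySem.List.foldl_append_ite, List.nil_append, List.any_cons]
    cases hc : sws.contains (PySem.Str.join "_"
        ((chars.filter (fun kv => decide (kv.1 ≠ cand.1))).map pvTokA)) with
    | true => simp
    | false => simp [ih]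

-- membership of the run heads: they are exactly the chars of the list
theorem mem_map_fst_pvRuns (l : List Char) (c' : Char) :
    c' ∈ (pvRuns l).map Prod.fst ↔ c' ∈ l := by
  induction l using pvRuns.induct with
  | case1 => simp [pvRuns]
  | case2 c rest ih =>
    rw [pvRuns]
    simp only [List.map_cons, List.mem_cons, ih]
    constructor
    · rintro (rfl | h)
      · exact Or.inl rfl
      · exact Or.inr ((rest.dropWhile_sublist (· == c)).mem h)
    · rintro (rfl | h)
      · exact Or.inl rfl
      · rcases List.mem_append.mp ((rest.takeWhile_append_dropWhile (p := (· == c))) ▸ h) with h | h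
        · exact Or.inl (by simpa using List.mem_takeWhile_imp h)
        · exact Or.inr h

-- on a nondecreasing list, the head run's char is strictly below everything after the run
theorem lt_of_mem_dropWhile (c : Char) (rest : List Char)
    (hp : rest.Pairwise (· ≤ ·)) (hle : ∀ x ∈ rest, c ≤ x)
    (x : Char) (hx : x ∈ rest.dropWhile (· == c)) : c < x := by
  cases hd : rest.dropWhile (· == c) with
  | nil => simp [hd] at hx
  | cons d t =>
    have hdne : ¬ (d == c) = true := by
      have := List.head_dropWhile_not (· == c) (l := rest) (by simp [hd])
      simpa [hd] using this
    have hdmem : d ∈ rest := (rest.dropWhile_sublist (· == c)).mem (hd ▸ .head _)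
    have hcd : c < d := lt_of_le_of_ne (hle d hdmem) (by simpa using fun h => hdne (by simp [h.symm]))
    rw [hd] at hx
    rcases List.mem_cons.mp hx with rfl | hx
    · exact hcd
    · have hdt : ∀ y ∈ t, d ≤ y := by
        have hsub : (rest.dropWhile (· == c)).Pairwise (· ≤ ·) :=
          hp.sublist (rest.dropWhile_sublist (· == c))
        rw [hd] at hsub
        exact fun y hy => (List.pairwise_cons.mp hsub).1 y hy
      exact lt_of_lt_of_le hcd (hdt x hx)

-- run-length encoding of a nondecreasing list: heads strictly increase
theorem pairwise_lt_map_fst_pvRuns (l : List Char) (h : l.Pairwise (· ≤ ·)) :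
    ((pvRuns l).map Prod.fst).Pairwise (· < ·) := by
  induction l using pvRuns.induct with
  | case1 => simp [pvRuns]
  | case2 c rest ih =>
    rw [pvRuns]
    have hp := List.pairwise_cons.mp h
    have hrest : (rest.dropWhile (· == c)).Pairwise (· ≤ ·) :=
      hp.2.sublist (rest.dropWhile_sublist (· == c))
    simp only [List.map_cons, List.pairwise_cons]
    refine ⟨?_, ih hrest⟩
    intro x hx
    rw [mem_map_fst_pvRuns] at hx
    exact lt_of_mem_dropWhile c rest hp.2 hp.1 x hx

-- each run carries the exact multiplicity of its char in the whole list
theorem snd_pvRuns_eq_count (l : List Char) (h : l.Pairwise (· ≤ ·)) :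
    ∀ p ∈ pvRuns l, p.2 = (l.count p.1 : Int) := by
  induction l using pvRuns.induct with
  | case1 => simp [pvRuns]
  | case2 c rest ih =>
    rw [pvRuns]
    have hp := List.pairwise_cons.mp h
    have hrest : (rest.dropWhile (· == c)).Pairwise (· ≤ ·) :=
      hp.2.sublist (rest.dropWhile_sublist (· == c))
    have hnotc : ∀ x ∈ rest.dropWhile (· == c), x ≠ c :=
      fun x hx => ne_of_gt (lt_of_mem_dropWhile c rest hp.2 hp.1 x hx)
    have hsplit : rest = rest.takeWhile (· == c) ++ rest.dropWhile (· == c) :=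
      (rest.takeWhile_append_dropWhile (p := (· == c))).symm
    intro p hp'
    rcases List.mem_cons.mp hp' with rfl | hp'
    · -- head run: count c l = 1 + takeWhile length
      have h1 : (rest.takeWhile (· == c)).count c = (rest.takeWhile (· == c)).length :=
        List.count_eq_length.mpr (fun y hy => ((by simpa using List.mem_takeWhile_imp hy : y = c)).symm)
      have h2 : (rest.dropWhile (· == c)).count c = 0 :=
        List.count_eq_zero.mpr (fun hc => (hnotc c hc) rfl)
      have hcr : rest.count c = (rest.takeWhile (· == c)).length := by
        conv_lhs => rw [hsplit]
        rw [List.count_append, h1, h2, Nat.add_zero]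
      show (1 + ((rest.takeWhile (· == c)).length : Int)) = ((c :: rest).count c : Int)
      rw [List.count_cons_self, hcr]
      push_cast
      ring
    · -- a later run: its char does not occur in the head segment
      have hmem : p.1 ∈ rest.dropWhile (· == c) := by
        have := mem_map_fst_pvRuns (rest.dropWhile (· == c)) p.1
        exact this.mp (List.mem_map_of_mem hp')
      have hne : p.1 ≠ c := hnotc _ hmem
      have h1 : (rest.takeWhile (· == c)).count p.1 = 0 :=
        List.count_eq_zero.mpr (fun hc => hne (by simpa using List.mem_takeWhile_imp hc))
      have hcr : rest.count p.1 = (rest.dropWhile (· == c)).count p.1 := by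
        conv_lhs => rw [hsplit]
        rw [List.count_append, h1, Nat.zero_add]
      rw [ih hrest p hp']
      simp [hcr, Ne.symm hne]

-- a list of pairs whose seconds are determined by the firsts is a map over its firsts
theorem eq_map_fst_of_snd (T : List (Char × Int)) (g : Char → Int)
    (h : ∀ p ∈ T, p.2 = g p.1) : T = (T.map Prod.fst).map (fun c => (c, g c)) := by
  induction T with
  | nil => rfl
  | cons p t ih =>
    simp only [List.map_cons, List.cons.injEq]
    exact ⟨by rw [← h p (.head _)], ih (fun q hq => h q (.tail _ hq))⟩

-- B's runs of the sorted chars = A's sorted counter items (both as sorted-distinct map of counts)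
theorem pvRuns_sorted_eq (cs : List Char) :
    pvRuns (PySem.List.sorted cs (fun x => x) false)
      = (PySem.List.sorted (PySem.Set.ofList cs) (fun x => x) false).map
          (fun c => (c, (cs.count c : Int))) := by
  set l := PySem.List.sorted cs (fun x => x) false with hl
  have hperm : l.Perm cs := PySem.List.sorted_perm cs (fun x => x) false
  have hpw : l.Pairwise (· ≤ ·) := PySem.List.sorted_pairwise cs (fun x => x)
  have hcount : ∀ c, l.count c = cs.count c := fun c => hperm.count_eq c
  have hruns : pvRuns l = ((pvRuns l).map Prod.fst).map (fun c => (c, (cs.count c : Int))) := by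
    refine eq_map_fst_of_snd _ _ (fun p hp => ?_)
    rw [snd_pvRuns_eq_count l hpw p hp, hcount]
  rw [hruns]
  congr 1
  -- the run heads are the strictly increasing enumeration of the distinct chars
  refine (PySem.List.sorted_eq_of_perm_of_pairwise_lt _ _ _ ?_ ?_).symm
  · refine (List.perm_ext_iff_of_nodup ?_ ?_).mpr ?_
    · exact (pairwise_lt_map_fst_pvRuns l hpw).nodup
    · exact PySem.Set.nodup_ofList cs
    · intro a
      rw [mem_map_fst_pvRuns, PySem.Set.mem_ofList, hl, PySem.List.mem_sorted]
  · exact pairwise_lt_map_fst_pvRuns l hpw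

-- A's sorted counter items are the same sorted-distinct map of counts
theorem chars_eq (cs : List Char) :
    PySem.List.sorted
        ((cs.foldl (fun d c => d.insert c (d.getD c 0 + 1)) PySem.Dict.empty).items)
        (fun e => e.1) false
      = (PySem.List.sorted (PySem.Set.ofList cs) (fun x => x) false).map
          (fun c => (c, (cs.count c : Int))) := by
  rw [PySem.Dict.foldl_insert_getD_add_one_eq_counter, PySem.Dict.items_counter]
  refine PySem.List.sorted_eq_of_perm_of_pairwise_lt _ _ (fun e : Char × Int => e.1) ?_ ?_
  · exact (PySem.List.sorted_perm (PySem.Set.ofList cs) (fun x => x) false).map _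
  · have := PySem.List.sorted_ofList_pairwise_lt cs
    exact List.pairwise_map.mpr (by simpa using this)
  -- fst of the mapped pairs is the char itself, strictly increasing

-- the quantifier swap: scanning candidates against the word set = scanning words against the candidate set
theorem any_contains_swap (M : List (Char × Int)) (g : Char × Int → String) (sws : List String) :
    M.any (fun x => sws.contains (g x))
      = sws.any (fun w => PySem.Set.contains (PySem.Set.ofList (M.map g)) w) := by
  rw [Bool.eq_iff_iff]
  simp only [List.any_eq_true, PySem.Set.contains, List.contains_eq_mem, decide_eq_true_eq,
    PySem.Set.mem_ofList, List.mem_map]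
  constructor
  · rintro ⟨x, hx, hw⟩; exact ⟨g x, hw, x, hx, rfl⟩
  · rintro ⟨w, hw, x, hx, rfl⟩; exact ⟨x, hx, hw⟩

-- ===== VERDICT (by name: the statement is the Claim_ definition above) =====
theorem isObtainable_spec : Claim_equal_isObtainable := by
  intro targetWord startWords_set _
  unfold Spec_isObtainable isObtainable isObtainable_alt
  simp only
  rw [chars_eq targetWord.toList, pvRuns_sorted_eq targetWord.toList, pvGoA_eq_any]
  set T := (PySem.List.sorted (PySem.Set.ofList targetWord.toList) (fun x => x) false).map
      (fun c => (c, (targetWord.toList.count c : Int))) with hT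
  rw [← any_contains_swap]
  refine PySem.List.any_congr_mem (fun x hx => ?_)
  rfl
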